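-- pv_equiv track=rewrite | github.com/cyrii42/advent_of_code | solutions/2015/day03.py | part_two
-- ===== SOURCE A (Python) =====
-- from dataclasses import dataclass, field
-- from enum import Enum
--
-- class Direction(Enum):
--     NORTH = '^'
--     SOUTH = 'v'
--     EAST = '>'
--     WEST = '<'
--
-- @dataclass
-- class Santa:
--     x: int = 0
--     y: int = 0
--     visited_points: set[tuple[int, int]] = field(default_factory=set)
--
--     def __post_init__(self):
--         self.visited_points.add((self.x, self.y))
--
--     def move(self, direction: Direction):
--         match direction:
--             case Direction.NORTH:
--                 self.y += 1
--             case Direction.SOUTH: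
--                 self.y -= 1
--             case Direction.EAST:
--                 self.x += 1
--             case Direction.WEST:
--                 self.x -= 1
--         self.visited_points.add((self.x, self.y))
--
-- def read_data(data: str) -> list[str]:
--     line_list = [line.strip('\n') for line in data]
--     return line_list
--
-- def part_two(data: str):
--     direction_list = read_data(data)
--
--     santa = Santa()
--     robo_santa = Santa()
--
--     for i, char in enumerate(direction_list):
--         if i % 2 == 0:
--             santa.move(Direction(char))
--         else:
--             robo_santa.move(Direction(char))
--
--     all_visited_points = santa.visited_points | robo_santa.visited_points
--     return len(all_visited_points)
-- ===== SOURCE B (Python) =====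
-- DELTAS = {'^': (0, 1), 'v': (0, -1), '>': (1, 0), '<': (-1, 0)}
--
--
-- def walk(moves):
--     """Fold a list of move characters into the set of visited points (always
--     containing the origin)."""
--     x, y = 0, 0
--     visited = {(0, 0)}
--     for char in moves:
--         dx, dy = DELTAS[char]
--         x, y = x + dx, y + dy
--         visited.add((x, y))
--     return visited
--
--
-- def part_two(data: str):
--     chars = list(data)
--     return len(walk(chars[::2]) | walk(chars[1::2]))
-- ===== Notes on version B (the rewrite author's own statement) =====
-- stated objective: simpler
-- what changed: Drops the Enum and the mutable Santa dataclass: B slices the move list into the even-index and odd-index sublists, folds each sublist independently into a set of visited points via a delta table, and returns the size of the union.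
import Mathlib
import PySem

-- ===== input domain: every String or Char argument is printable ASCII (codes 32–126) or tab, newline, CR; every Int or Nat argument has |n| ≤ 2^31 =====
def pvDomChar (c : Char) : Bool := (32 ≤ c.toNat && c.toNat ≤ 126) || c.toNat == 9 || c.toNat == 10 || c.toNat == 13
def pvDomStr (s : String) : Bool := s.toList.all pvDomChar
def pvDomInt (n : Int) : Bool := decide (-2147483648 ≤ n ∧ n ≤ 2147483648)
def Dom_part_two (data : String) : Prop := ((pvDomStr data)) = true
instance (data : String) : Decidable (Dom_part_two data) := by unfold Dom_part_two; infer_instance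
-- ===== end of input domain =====

-- B replaces the Enum/dataclass interleaved loop by slicing the moves into the even- and
-- odd-index sublists and folding each independently into a set of visited points (objective: simpler).

-- ===== PORT A =====
abbrev PvSanta := Int × Int × PySem.Set (Int × Int)

def pvDirChars : List Char := ['^', 'v', '>', '<']

-- Santa.move for an already-validated Direction (the match over the four cases)
def pvMove (s : PvSanta) (c : Char) : PvSanta :=
  let p : Int × Int :=
    if c = '^' then (s.1, s.2.1 + 1)
    else if c = 'v' then (s.1, s.2.1 - 1)
    else if c = '>' then (s.1 + 1, s.2.1)
    else (s.1 - 1, s.2.1)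
  (p.1, p.2, PySem.Set.add s.2.2 (p.1, p.2))

-- one iteration of A's loop; none = the ValueError of Direction(char)
def pvStepA (st : Option (PvSanta × PvSanta)) (ic : Int × List Char) : Option (PvSanta × PvSanta) :=
  st.bind (fun sr =>
    match ic.2 with
    | [c] =>
        if c ∈ pvDirChars then
          if PySem.Int.mod ic.1 2 = 0 then some (pvMove sr.1 c, sr.2)
          else some (sr.1, pvMove sr.2 c)
        else none
    | _ => none)

def part_two (data : String) : Int :=
  -- read_data: iterating a str yields 1-char strings; c.strip('\n') is '' for '\n', else the char
  let directionList : List (List Char) := data.toList.map (fun c => if c = '\n' then ([] : List Char) else [c])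
  let init : PvSanta := ((0 : Int), (0 : Int), PySem.Set.add PySem.Set.empty ((0 : Int), (0 : Int)))
  match (PySem.List.enumerate directionList).foldl pvStepA (some (init, init)) with
  | some sr => PySem.Set.len (PySem.Set.union sr.1.2.2 sr.2.2.2)
  | none => 0  -- ValueError: excluded by Pre_part_two

-- ===== PORT B =====
def pvDelta (c : Char) : Option (Int × Int) :=
  if c = '^' then some (0, 1)
  else if c = 'v' then some (0, -1)
  else if c = '>' then some (1, 0)
  else if c = '<' then some (-1, 0)
  else none  -- none = the KeyError of DELTAS[char]

-- walk: fold the moves into (x, y, visited); Option threads the KeyError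
def pvWalk (moves : List Char) : Option (PySem.Set (Int × Int)) :=
  (moves.foldl
    (fun st c => st.bind (fun p =>
      (pvDelta c).map (fun d =>
        (p.1 + d.1, p.2.1 + d.2, PySem.Set.add p.2.2 (p.1 + d.1, p.2.1 + d.2)))))
    (some ((0 : Int), (0 : Int), PySem.Set.ofList [((0 : Int), (0 : Int))]))).map (fun p => p.2.2)

def part_two_alt (data : String) : Int :=
  let chars := data.toList
  -- chars[::2] / chars[1::2]; slice? with step 2 is always `some`, so getD [] is exact
  match pvWalk ((PySem.List.slice? chars none none 2).getD []),
        pvWalk ((PySem.List.slice? chars (some 1) none 2).getD []) with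
  | some s1, some s2 => PySem.Set.len (PySem.Set.union s1 s2)
  | _, _ => 0  -- KeyError: excluded by Pre_part_two

-- ===== PRECONDITION & SPEC =====
-- Pre_ excludes exactly the inputs where A raises ValueError (a character that is not one of ^ v > <,
-- including newlines, which read_data strips to ''); B raises KeyError there.
def Pre_part_two (data : String) : Prop := data.toList.all (fun c => pvDirChars.contains c) = true
instance (data : String) : Decidable (Pre_part_two data) := by unfold Pre_part_two; infer_instance

def pvWitness_part_two : String := "^"

def Spec_part_two (data : String) (out : Int) : Prop := out = part_two_alt data
instance (data : String) (out : Int) : Decidable (Spec_part_two data out) := by unfold Spec_part_two; infer_instance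

-- ===== CLAIM (what is proved, stated in full; the proofs are below) =====
def Claim_equal_part_two : Prop := ∀ (data : String), Dom_part_two data → Pre_part_two data → Spec_part_two data (part_two data)

-- ===== LEMMAS AND PROOFS =====

-- the even-index sublist
def pvEveryOther {α : Type} : List α → List α
  | [] => []
  | [x] => [x]
  | x :: _ :: rest => x :: pvEveryOther rest

lemma pvEveryOther_cons {α : Type} (c : α) (cs : List α) :
    pvEveryOther (c :: cs) = c :: pvEveryOther cs.tail := by
  cases cs <;> rfl

lemma pvMem_everyOther {α : Type} {x : α} : ∀ {cs : List α}, x ∈ pvEveryOther cs → x ∈ cs := by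
  intro cs
  induction cs using pvEveryOther.induct with
  | case1 => simp [pvEveryOther]
  | case2 y => simp [pvEveryOther]
  | case3 y z rest ih =>
      simp only [pvEveryOther, List.mem_cons]
      rintro (h | h)
      · exact Or.inl h
      · exact Or.inr (Or.inr (ih h))

lemma pvFilterMap_everyOther {α : Type} (xs : List α) :
    List.filterMap (fun k => xs[2 * k]?) (List.range ((xs.length + 1) / 2)) = pvEveryOther xs := by
  induction xs using pvEveryOther.induct with
  | case1 => simp [pvEveryOther]
  | case2 x => simp [pvEveryOther]
  | case3 x y rest ih =>
      have hlen : (x :: y :: rest).length + 1 = ((rest.length + 1) + 2) := by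
        simp only [List.length_cons]
      rw [hlen]
      have h2 : ((rest.length + 1) + 2) / 2 = (rest.length + 1) / 2 + 1 := by omega
      rw [h2, List.range_succ_eq_map, List.filterMap_cons, List.filterMap_map]
      have hfun : ((fun k => (x :: y :: rest)[2 * k]?) ∘ Nat.succ) = fun k => rest[2 * k]? := by
        funext k
        have : 2 * Nat.succ k = (2 * k) + 1 + 1 := by omega
        simp [this]
      rw [hfun, ih]
      simp [pvEveryOther]

lemma pvSlice2_even {α : Type} (xs : List α) :
    PySem.List.slice? xs none none 2 = some (pvEveryOther xs) := by
  rw [← pvFilterMap_everyOther]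
  simp only [PySem.List.slice?, PySem.List.sliceIndices]
  norm_num
  have hcount : (if 0 < xs.length then (((xs.length : Int) + 2 - 1) / 2).toNat else 0)
      = (xs.length + 1) / 2 := by
    split_ifs with h <;> omega
  congr 1
  rw [hcount]

lemma pvSlice2_odd {α : Type} (xs : List α) :
    PySem.List.slice? xs (some 1) none 2 = some (pvEveryOther xs.tail) := by
  rcases xs with _ | ⟨a, t⟩
  · simp [PySem.List.slice?, PySem.List.sliceIndices, pvEveryOther]
  · have base := pvFilterMap_everyOther t
    simp only [PySem.List.slice?, PySem.List.sliceIndices]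
    norm_num
    rw [← base]
    have hcount : (if 0 < t.length then (((t.length : Int) + 2 - 1) / 2).toNat else 0)
        = (t.length + 1) / 2 := by
      split_ifs with h <;> omega
    have hidx : (fun x : Nat => (a :: t)[((1 : Int) + 2 * (x : Int)).toNat]?)
        = fun k : Nat => t[2 * k]? := by
      funext k
      have h1 : ((1 : Int) + 2 * (k : Int)).toNat = 2 * k + 1 := by omega
      rw [h1, List.getElem?_cons_succ]
    rw [hidx, hcount]

def pvInit : PvSanta := ((0 : Int), (0 : Int), PySem.Set.add PySem.Set.empty ((0 : Int), (0 : Int)))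

lemma pvWalk_valid (ms : List Char) (h : ∀ c ∈ ms, c ∈ pvDirChars) :
    pvWalk ms = some ((ms.foldl pvMove pvInit).2.2) := by
  have main : ∀ (ms : List Char), (∀ c ∈ ms, c ∈ pvDirChars) → ∀ s : PvSanta,
      ms.foldl
        (fun st c => st.bind (fun p =>
          (pvDelta c).map (fun d =>
            (p.1 + d.1, p.2.1 + d.2, PySem.Set.add p.2.2 (p.1 + d.1, p.2.1 + d.2)))))
        (some s) = some (ms.foldl pvMove s) := by
    intro ms
    induction ms with
    | nil => intro _ s; rfl
    | cons c cs ih =>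
        intro hv s
        have hc : c ∈ pvDirChars := hv c (List.mem_cons_self)
        have hstep : (pvDelta c).map (fun d =>
            (s.1 + d.1, s.2.1 + d.2, PySem.Set.add s.2.2 (s.1 + d.1, s.2.1 + d.2)))
            = some (pvMove s c) := by
          rcases (by simpa [pvDirChars] using hc : c = '^' ∨ c = 'v' ∨ c = '>' ∨ c = '<') with
            h | h | h | h <;> subst h <;> simp [pvDelta, pvMove, sub_eq_add_neg]
        simp only [List.foldl_cons, Option.bind_some, hstep]
        exact ih (fun x hx => hv x (List.mem_cons_of_mem _ hx)) (pvMove s c)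
  unfold pvWalk
  rw [show ((0 : Int), (0 : Int), PySem.Set.ofList [((0 : Int), (0 : Int))]) = pvInit from rfl,
      main ms h pvInit]
  rfl

lemma pvInterleave (cs : List Char) :
    ∀ (n : Int), 0 ≤ n → (∀ c ∈ cs, c ∈ pvDirChars) → ∀ (s r : PvSanta),
    (PySem.List.enumerate (cs.map (fun c => if c = '\n' then ([] : List Char) else [c])) n).foldl
        pvStepA (some (s, r)) =
      if PySem.Int.mod n 2 = 0
      then some ((pvEveryOther cs).foldl pvMove s, (pvEveryOther cs.tail).foldl pvMove r)
      else some ((pvEveryOther cs.tail).foldl pvMove s, (pvEveryOther cs).foldl pvMove r) := by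
  induction cs with
  | nil =>
      intro n _ _ s r
      simp only [List.map_nil, PySem.List.enumerate_nil, List.foldl_nil]
      split_ifs <;> rfl
  | cons c cs ih =>
      intro n hn hv s r
      have hc : c ∈ pvDirChars := hv c (List.mem_cons_self)
      have hcn : ¬ c = '\n' := by
        rcases (by simpa [pvDirChars] using hc : c = '^' ∨ c = 'v' ∨ c = '>' ∨ c = '<') with
          h | h | h | h <;> subst h <;> decide
      have hv' : ∀ x ∈ cs, x ∈ pvDirChars := fun x hx => hv x (List.mem_cons_of_mem _ hx)
      have hmodn : PySem.Int.mod n 2 = n % 2 := PySem.Int.mod_eq_emod_of_pos (by omega)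
      have hmodn1 : PySem.Int.mod (n + 1) 2 = (n + 1) % 2 := PySem.Int.mod_eq_emod_of_pos (by omega)
      simp only [List.map_cons, PySem.List.enumerate_cons, List.foldl_cons, if_neg hcn]
      have hstep : pvStepA (some (s, r)) (n, [c]) =
          if PySem.Int.mod n 2 = 0 then some (pvMove s c, r) else some (s, pvMove r c) := by
        simp [pvStepA, hc]
      rw [hstep]
      by_cases hpar : PySem.Int.mod n 2 = 0
      · have hpar1 : ¬ PySem.Int.mod (n + 1) 2 = 0 := by rw [hmodn1]; rw [hmodn] at hpar; omega
        rw [if_pos hpar, if_pos hpar, ih (n + 1) (by omega) hv' (pvMove s c) r, if_neg hpar1]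
        rw [pvEveryOther_cons, List.foldl_cons, List.tail_cons]
      · have hpar1 : PySem.Int.mod (n + 1) 2 = 0 := by rw [hmodn1]; rw [hmodn] at hpar; omega
        rw [if_neg hpar, if_neg hpar, ih (n + 1) (by omega) hv' s (pvMove r c), if_pos hpar1]
        rw [pvEveryOther_cons, List.foldl_cons, List.tail_cons]

-- ===== VERDICT (by name: the statement is the Claim_ definition above) =====
theorem part_two_spec : Claim_equal_part_two := by
  intro data _ hpre
  unfold Spec_part_two
  have hv : ∀ c ∈ data.toList, c ∈ pvDirChars := by
    intro c hc
    simpa using List.all_eq_true.mp hpre c hc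
  simp only [part_two, part_two_alt]
  rw [pvInterleave data.toList 0 (by omega) hv]
  rw [pvSlice2_even, pvSlice2_odd]
  simp only [Option.getD_some]
  rw [pvWalk_valid _ (fun c hc => hv c (pvMem_everyOther hc)),
      pvWalk_valid _ (fun c hc => hv c (List.mem_of_mem_tail (pvMem_everyOther hc)))]
  have h0 : PySem.Int.mod 0 2 = 0 := by decide
  rw [if_pos h0]
  rfl
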